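-- pv_equiv track=rewrite | github.com/negrinho/deep_architect | docs/main_update_code_in_docs.py | normalize_block_lines
-- ===== SOURCE A (Python) =====
-- def normalize_block_lines(lines):
--     out_lines = []
--     start_idx = 0
--     end_idx = len(lines)
--     for idx, s in enumerate(lines):
--         if s != '':
--             start_idx = idx
--             break
--
--     for idx, s in enumerate(lines[::-1]):
--         if s != '':
--             end_idx = len(lines) - idx
--             break
--
--     out_lines.append('')
--     out_lines.extend(lines[start_idx:end_idx])
--     out_lines.append('')
--     return out_lines
-- ===== SOURCE B (Python) =====
-- def normalize_block_lines(lines):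
--     first = None
--     last = None
--     for idx, s in enumerate(lines):
--         if s != '':
--             if first is None:
--                 first = idx
--             last = idx
--     if first is None:
--         start, end = 0, len(lines)
--     else:
--         start, end = first, last + 1
--     return [''] + lines[start:end] + ['']
-- ===== Notes on version B (the rewrite author's own statement) =====
-- stated objective: simpler
-- what changed: One forward pass tracking the first and last non-empty indices replaces A's two scans (forward, and over a reversed copy of the list).
import Mathlib
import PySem

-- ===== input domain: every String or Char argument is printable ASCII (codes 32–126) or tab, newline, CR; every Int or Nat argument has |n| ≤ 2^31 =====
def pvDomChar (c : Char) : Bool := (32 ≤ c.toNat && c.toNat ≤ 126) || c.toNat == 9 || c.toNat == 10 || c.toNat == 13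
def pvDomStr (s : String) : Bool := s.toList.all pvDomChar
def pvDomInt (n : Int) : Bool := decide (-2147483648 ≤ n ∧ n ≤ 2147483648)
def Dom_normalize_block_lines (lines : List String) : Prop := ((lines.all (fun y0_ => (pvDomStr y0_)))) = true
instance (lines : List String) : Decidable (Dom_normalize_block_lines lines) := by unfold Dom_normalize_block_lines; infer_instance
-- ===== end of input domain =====

-- B replaces A's two scans (forward + over a reversed copy) by one forward pass tracking both
-- boundaries; objective: simpler.

-- ===== PORT A =====
-- A's "for idx, s in enumerate(...): if s != '': ...; break" loops: first index ≥ k with a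
-- non-empty line (none when the loop falls through without breaking); exact.
def pvFirstNE : Nat → List String → Option Nat
  | _, [] => none
  | k, s :: t => if s ≠ "" then some k else pvFirstNE (k + 1) t

def normalize_block_lines (lines : List String) : List String :=
  -- start_idx = 0 unless the first loop breaks at idx
  let start_idx : Nat := (pvFirstNE 0 lines).getD 0
  -- second loop runs over lines[::-1] (= lines.reverse, exact); end_idx = len(lines) - idx
  let end_idx : Nat :=
    match pvFirstNE 0 lines.reverse with
    | none => lines.length
    | some i => lines.length - i
  [""] ++ PySem.List.slice lines (some (start_idx : Int)) (some (end_idx : Int)) ++ [""]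

-- ===== PORT B =====
-- B's single loop: state (first, last), index k; exact transliteration of Source B's for-loop.
def pvScanB : Nat → Option Nat → Option Nat → List String → Option Nat × Option Nat
  | _, f, l, [] => (f, l)
  | k, f, l, s :: t =>
    if s ≠ "" then
      pvScanB (k + 1) (match f with | none => some k | some a => some a) (some k) t
    else
      pvScanB (k + 1) f l t

def normalize_block_lines_alt (lines : List String) : List String :=
  match pvScanB 0 none none lines with
  | (none, _) =>
      [""] ++ PySem.List.slice lines (some (0 : Int)) (some (lines.length : Int)) ++ [""]
  | (some a, l) =>
      -- in Source B 'last' is always set when 'first' is; getD a is never consulted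
      [""] ++ PySem.List.slice lines (some (a : Int)) (some ((l.getD a + 1 : Nat) : Int)) ++ [""]

-- ===== PRECONDITION & SPEC =====
def Spec_normalize_block_lines (lines : List String) (out : List String) : Prop := out = normalize_block_lines_alt lines
instance (lines : List String) (out : List String) : Decidable (Spec_normalize_block_lines lines out) := by unfold Spec_normalize_block_lines; infer_instance

-- ===== CLAIM (what is proved, stated in full; the proofs are below) =====
def Claim_equal_normalize_block_lines : Prop := ∀ (lines : List String), Dom_normalize_block_lines lines → Spec_normalize_block_lines lines (normalize_block_lines lines)

-- ===== LEMMAS AND PROOFS =====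

theorem pvFirstNE_shift (xs : List String) (k : Nat) :
    pvFirstNE k xs = (pvFirstNE 0 xs).map (· + k) := by
  induction xs generalizing k with
  | nil => simp [pvFirstNE]
  | cons s t ih =>
    by_cases hs : s = ""
    · simp only [pvFirstNE, hs, ne_eq, not_true_eq_false, if_false, ih (k + 1), ih 1,
        Option.map_map]
      congr 1
      funext x
      simp only [Function.comp_apply]
      omega
    · simp [pvFirstNE, hs]

theorem pvFirstNE_none_iff (xs : List String) (k : Nat) :
    pvFirstNE k xs = none ↔ ∀ s ∈ xs, s = "" := by
  induction xs generalizing k with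
  | nil => simp [pvFirstNE]
  | cons s t ih =>
    by_cases hs : s = ""
    · simp [pvFirstNE, hs, ih (k + 1)]
    · simp [pvFirstNE, hs]

theorem pvFirstNE_lt (xs : List String) (k j : Nat) (h : pvFirstNE k xs = some j) :
    j < k + xs.length := by
  induction xs generalizing k with
  | nil => simp [pvFirstNE] at h
  | cons s t ih =>
    by_cases hs : s = ""
    · simp [pvFirstNE, hs] at h
      have := ih (k + 1) h
      simp only [List.length_cons]
      omega
    · simp [pvFirstNE, hs] at h
      simp only [List.length_cons]
      omega

theorem pvScanB_fst_some (xs : List String) (k a : Nat) (l : Option Nat) :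
    (pvScanB k (some a) l xs).1 = some a := by
  induction xs generalizing k l with
  | nil => simp [pvScanB]
  | cons s t ih =>
    by_cases hs : s = "" <;> simp [pvScanB, hs, ih]

theorem pvScanB_fst_none (xs : List String) (k : Nat) (l : Option Nat) :
    (pvScanB k none l xs).1 = pvFirstNE k xs := by
  induction xs generalizing k l with
  | nil => simp [pvScanB, pvFirstNE]
  | cons s t ih =>
    by_cases hs : s = ""
    · simp [pvScanB, pvFirstNE, hs, ih]
    · simp [pvScanB, pvFirstNE, hs, pvScanB_fst_some]

theorem pvScanB_snd_append (xs : List String) (k : Nat) (f l : Option Nat) (s : String) :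
    (pvScanB k f l (xs ++ [s])).2
      = if s ≠ "" then some (k + xs.length) else (pvScanB k f l xs).2 := by
  induction xs generalizing k f l with
  | nil => by_cases hs : s = "" <;> simp [pvScanB, hs]
  | cons x t ih =>
    simp only [List.cons_append, pvScanB]
    by_cases hs : s = ""
    · subst hs
      by_cases hx : x = "" <;> simp [hx, ih]
    · by_cases hx : x = "" <;> simp [hx, hs, ih] <;> omega

theorem pvScanB_snd (xs : List String) (k : Nat) (f l : Option Nat) :
    (pvScanB k f l xs).2
      = match pvFirstNE 0 xs.reverse with
        | none => l
        | some j => some (k + (xs.length - 1 - j)) := by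
  induction xs using List.reverseRecOn generalizing k f l with
  | nil => simp [pvScanB, pvFirstNE]
  | append_singleton xs s ih =>
    rw [pvScanB_snd_append]
    by_cases hs : s = ""
    · simp only [hs, ne_eq, not_true_eq_false, if_false, ih k f l]
      rw [List.reverse_append, List.reverse_singleton, List.singleton_append]
      simp only [pvFirstNE, ne_eq, not_true_eq_false, if_false]
      rw [pvFirstNE_shift xs.reverse 1]
      cases hj : pvFirstNE 0 xs.reverse with
      | none => simp
      | some j =>
        simp only [Option.map_some, List.length_append, List.length_cons, List.length_nil]
        congr 1
        omega
    · simp only [ne_eq, hs, not_false_eq_true, if_true]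
      rw [List.reverse_append, List.reverse_singleton, List.singleton_append]
      simp [pvFirstNE, hs]

theorem normalize_block_lines_eq_alt (lines : List String) :
    normalize_block_lines lines = normalize_block_lines_alt lines := by
  unfold normalize_block_lines normalize_block_lines_alt
  cases h : pvFirstNE 0 lines with
  | none =>
    have hall : ∀ s ∈ lines, s = "" := (pvFirstNE_none_iff lines 0).mp h
    have hrev : pvFirstNE 0 lines.reverse = none := by
      rw [pvFirstNE_none_iff]
      intro s hs
      exact hall s (List.mem_reverse.mp hs)
    have hfst : (pvScanB 0 none none lines).1 = none := by
      rw [pvScanB_fst_none, h]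
    rcases hp : pvScanB 0 none none lines with ⟨f, l⟩
    rw [hp] at hfst
    simp only at hfst
    subst hfst
    simp [hrev]
  | some a =>
    have hne : ¬ ∀ s ∈ lines, s = "" := by
      intro hall
      simp [(pvFirstNE_none_iff lines 0).mpr hall] at h
    have hrev : ∃ j, pvFirstNE 0 lines.reverse = some j := by
      cases hr : pvFirstNE 0 lines.reverse with
      | none =>
        exact absurd (fun s hs => (pvFirstNE_none_iff lines.reverse 0).mp hr s
          (List.mem_reverse.mpr hs)) hne
      | some j => exact ⟨j, rfl⟩
    obtain ⟨j, hj⟩ := hrev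
    have hjlt : j < lines.length := by
      have := pvFirstNE_lt lines.reverse 0 j hj
      simpa using this
    have hfst : (pvScanB 0 none none lines).1 = some a := by
      rw [pvScanB_fst_none, h]
    have hsnd : (pvScanB 0 none none lines).2 = some (lines.length - 1 - j) := by
      rw [pvScanB_snd, hj]
      simp
    rcases hp : pvScanB 0 none none lines with ⟨f, l⟩
    rw [hp] at hfst hsnd
    simp only at hfst hsnd
    subst hfst; subst hsnd
    simp only [hj, Option.getD_some]
    have : lines.length - 1 - j + 1 = lines.length - j := by omega
    rw [this]

-- ===== VERDICT (by name: the statement is the Claim_ definition above) =====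
theorem normalize_block_lines_spec : Claim_equal_normalize_block_lines := by
  intro lines _
  unfold Spec_normalize_block_lines
  exact normalize_block_lines_eq_alt lines
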